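-- pv_equiv track=rewrite | github.com/ziyangyeh/bevfusion-triton | ops/spconv/src/spconv_triton.py | _valid_out_pos
-- ===== SOURCE A (Python) =====
-- from itertools import product
--
-- def _valid_out_pos(
-- 	input_pos: list[int],
-- 	kernel_size: list[int],
-- 	stride: list[int],
-- 	padding: list[int],
-- 	dilation: list[int],
-- 	out_spatial_shape: list[int],
-- ) -> list[tuple[list[int], int]]:
-- 	ndim = len(input_pos)
-- 	lowers = []
-- 	uppers = []
-- 	for i in range(ndim):
-- 		lower = (
-- 			input_pos[i] - (kernel_size[i] - 1) * dilation[i] - 1 + stride[i] + padding[i]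
-- 		) // stride[i]
-- 		upper = (input_pos[i] + padding[i]) // stride[i]
-- 		lowers.append(lower)
-- 		uppers.append(upper)
--
-- 	counter_sizes = []
-- 	for i in range(ndim):
-- 		counter_sizes.append((uppers[i] - lowers[i]) // dilation[i] + 1)
--
-- 	valid_points: list[tuple[list[int], int]] = []
-- 	for counter in product(*[range(size) for size in counter_sizes]):
-- 		coords = [0] * ndim
-- 		offset = 0
-- 		mult = 1
-- 		valid = True
-- 		for j in range(ndim - 1, -1, -1):
-- 			val = uppers[j] - counter[j] * dilation[j]
-- 			coords[j] = val
-- 			if val < 0 or val > out_spatial_shape[j] - 1: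
-- 				valid = False
-- 			offset += mult * ((input_pos[j] - val * stride[j] + padding[j]) // dilation[j])
-- 			mult *= kernel_size[j]
-- 		if valid:
-- 			valid_points.append((coords, offset))
-- 	return valid_points
-- ===== SOURCE B (Python) =====
-- def _valid_out_pos(
-- 	input_pos: list[int],
-- 	kernel_size: list[int],
-- 	stride: list[int],
-- 	padding: list[int],
-- 	dilation: list[int],
-- 	out_spatial_shape: list[int],
-- ) -> list[tuple[list[int], int]]:
-- 	ndim = len(input_pos)
-- 	# Per-dimension prefilter: only the kernel taps whose output coordinate is
-- 	# inside the spatial extent survive, each stored with its kernel-offset term.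
-- 	per_dim = []
-- 	for j in range(ndim):
-- 		upper = (input_pos[j] + padding[j]) // stride[j]
-- 		lower = (
-- 			input_pos[j] - (kernel_size[j] - 1) * dilation[j] - 1 + stride[j] + padding[j]
-- 		) // stride[j]
-- 		size = (upper - lower) // dilation[j] + 1
-- 		entries = []
-- 		for c in range(size):
-- 			val = upper - c * dilation[j]
-- 			if 0 <= val <= out_spatial_shape[j] - 1:
-- 				entries.append((val, (input_pos[j] - val * stride[j] + padding[j]) // dilation[j]))
-- 		per_dim.append(entries)
-- 	# mults[j] = product of kernel_size[j+1:ndim] (the right-to-left offset weights)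
-- 	mults = []
-- 	m = 1
-- 	for k in reversed(kernel_size[:ndim]):
-- 		mults.append(m)
-- 		m *= k
-- 	mults.reverse()
-- 	# iterative product over the filtered per-dimension lists (lexicographic order)
-- 	results = [([], 0)]
-- 	for entries, mult in zip(per_dim, mults):
-- 		results = [
-- 			(coords + [val], offset + term * mult)
-- 			for coords, offset in results
-- 			for val, term in entries
-- 		]
-- 	return results
-- ===== Notes on version B (the rewrite author's own statement) =====
-- stated objective: alternative
-- what changed: Instead of enumerating the full cartesian product of counter ranges and re-deriving coords/offset/valid per tuple in a right-to-left indexed inner loop with a valid flag, B prefilters each dimension once into a list of (coordinate, term) entries inside the spatial extent, precomputes the right-to-left offset multipliers, and assembles the output by an iterative product over the filtered per-dimension lists, never enumerating invalid combinations.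
-- outside the precondition, e.g. on _valid_out_pos([1, 0], [1, 1], [2, 1], [0, 0], [1, 1], [5]): A returns [], B raises IndexError
import Mathlib
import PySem

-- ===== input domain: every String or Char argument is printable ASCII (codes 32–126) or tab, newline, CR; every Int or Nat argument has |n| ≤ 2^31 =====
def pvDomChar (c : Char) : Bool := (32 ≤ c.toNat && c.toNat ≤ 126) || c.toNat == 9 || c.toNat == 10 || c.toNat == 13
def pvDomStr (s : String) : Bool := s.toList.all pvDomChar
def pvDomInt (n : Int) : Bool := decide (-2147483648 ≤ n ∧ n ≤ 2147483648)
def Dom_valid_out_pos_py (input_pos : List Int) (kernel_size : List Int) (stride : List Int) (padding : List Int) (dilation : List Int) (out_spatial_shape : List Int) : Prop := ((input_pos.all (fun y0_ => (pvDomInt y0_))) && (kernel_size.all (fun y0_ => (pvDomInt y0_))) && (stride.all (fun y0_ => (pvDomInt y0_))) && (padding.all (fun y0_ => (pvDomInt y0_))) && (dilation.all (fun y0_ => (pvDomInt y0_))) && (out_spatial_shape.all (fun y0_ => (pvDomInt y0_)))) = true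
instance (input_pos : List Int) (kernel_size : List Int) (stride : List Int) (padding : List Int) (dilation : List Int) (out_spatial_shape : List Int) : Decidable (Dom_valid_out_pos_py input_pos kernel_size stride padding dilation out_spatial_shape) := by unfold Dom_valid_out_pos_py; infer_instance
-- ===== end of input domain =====

-- B replaces A's enumerate-all-counters-then-check-valid-flag product by per-dimension
-- prefiltered (coordinate, term) lists with precomputed offset multipliers, assembled by an
-- iterative product, so invalid combinations are never enumerated (objective: alternative).


-- ===== PORT A =====

-- xs[i] for an index Python already checked is in range (all uses are under Pre_)
def pvG (xs : List Int) (j : Int) : Int := PySem.List.pyGetD xs j 0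

-- itertools.product(*lists): first list outermost, lexicographic order
def pvProd : List (List Int) → List (List Int)
  | [] => [[]]
  | l :: ls => l.flatMap (fun a => (pvProd ls).map (a :: ·))

def valid_out_pos_py (input_pos : List Int) (kernel_size : List Int) (stride : List Int) (padding : List Int) (dilation : List Int) (out_spatial_shape : List Int) : List (List Int × Int) :=
  let ndim := input_pos.length
  let lu := (PySem.List.pyRange 0 (ndim : Int) 1).foldl
    (fun (p : List Int × List Int) i =>
      (p.1 ++ [PySem.Int.floordiv (pvG input_pos i - (pvG kernel_size i - 1) * pvG dilation i - 1 + pvG stride i + pvG padding i) (pvG stride i)],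
       p.2 ++ [PySem.Int.floordiv (pvG input_pos i + pvG padding i) (pvG stride i)]))
    ([], [])
  let lowers := lu.1
  let uppers := lu.2
  let counter_sizes := (PySem.List.pyRange 0 (ndim : Int) 1).foldl
    (fun (cs : List Int) i => cs ++ [PySem.Int.floordiv (pvG uppers i - pvG lowers i) (pvG dilation i) + 1]) []
  let counters := pvProd (counter_sizes.map (fun size => PySem.List.pyRange 0 size 1))
  counters.foldl
    (fun acc counter =>
      let s := (PySem.List.pyRange ((ndim : Int) - 1) (-1) (-1)).foldl
        (fun (s : List Int × Int × Int × Bool) j =>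
          let val := pvG uppers j - pvG counter j * pvG dilation j
          let coords := PySem.List.pySetD s.1 j val
          let valid := if val < 0 ∨ val > pvG out_spatial_shape j - 1 then false else s.2.2.2
          let offset := s.2.1 + s.2.2.1 * PySem.Int.floordiv (pvG input_pos j - val * pvG stride j + pvG padding j) (pvG dilation j)
          let mult := s.2.2.1 * pvG kernel_size j
          (coords, offset, mult, valid))
        (List.replicate ndim 0, 0, 1, true)
      if s.2.2.2 then acc ++ [(s.1, s.2.1)] else acc)
    []

-- ===== PORT B =====

def valid_out_pos_py_alt (input_pos : List Int) (kernel_size : List Int) (stride : List Int) (padding : List Int) (dilation : List Int) (out_spatial_shape : List Int) : List (List Int × Int) :=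
  let ndim := input_pos.length
  let per_dim := (PySem.List.pyRange 0 (ndim : Int) 1).foldl
    (fun (pd : List (List (Int × Int))) j =>
      let upper := PySem.Int.floordiv (pvG input_pos j + pvG padding j) (pvG stride j)
      let lower := PySem.Int.floordiv (pvG input_pos j - (pvG kernel_size j - 1) * pvG dilation j - 1 + pvG stride j + pvG padding j) (pvG stride j)
      let size := PySem.Int.floordiv (upper - lower) (pvG dilation j) + 1
      let entries := (PySem.List.pyRange 0 size 1).foldl
        (fun (es : List (Int × Int)) c =>
          let val := upper - c * pvG dilation j
          if 0 ≤ val ∧ val ≤ pvG out_spatial_shape j - 1 then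
            es ++ [(val, PySem.Int.floordiv (pvG input_pos j - val * pvG stride j + pvG padding j) (pvG dilation j))]
          else es) []
      pd ++ [entries]) []
  let mults := ((((PySem.List.slice kernel_size none (some (ndim : Int))).reverse).foldl
      (fun (p : List Int × Int) k => (p.1 ++ [p.2], p.2 * k)) ([], 1)).1).reverse
  (per_dim.zip mults).foldl
    (fun (results : List (List Int × Int)) em =>
      results.flatMap (fun co => em.1.map (fun vt => (co.1 ++ [vt.1], co.2 + vt.2 * em.2))))
    [([], 0)]

-- ===== PRECONDITION & SPEC =====

-- Pre_ excludes inputs where Python raises: a zero stride or dilation among the first ndim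
-- entries (ZeroDivisionError) and parameter lists shorter than ndim (IndexError); the length
-- bound on out_spatial_shape also excludes inputs where A happens to return [] without ever
-- indexing the short list because another dimension's counter range is empty (see cites).
def Pre_valid_out_pos_py (input_pos : List Int) (kernel_size : List Int) (stride : List Int) (padding : List Int) (dilation : List Int) (out_spatial_shape : List Int) : Prop :=
  input_pos.length ≤ kernel_size.length ∧ input_pos.length ≤ stride.length ∧
  input_pos.length ≤ padding.length ∧ input_pos.length ≤ dilation.length ∧
  input_pos.length ≤ out_spatial_shape.length ∧
  (∀ x ∈ stride.take input_pos.length, x ≠ 0) ∧ (∀ x ∈ dilation.take input_pos.length, x ≠ 0)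
instance (input_pos : List Int) (kernel_size : List Int) (stride : List Int) (padding : List Int) (dilation : List Int) (out_spatial_shape : List Int) : Decidable (Pre_valid_out_pos_py input_pos kernel_size stride padding dilation out_spatial_shape) := by unfold Pre_valid_out_pos_py; infer_instance

def pvWitness_valid_out_pos_py : List Int × List Int × List Int × List Int × List Int × List Int :=
  ([2, 1], [2, 2], [1, 1], [1, 0], [1, 1], [4, 3])

def Spec_valid_out_pos_py (input_pos : List Int) (kernel_size : List Int) (stride : List Int) (padding : List Int) (dilation : List Int) (out_spatial_shape : List Int) (out : List (List Int × Int)) : Prop := out = valid_out_pos_py_alt input_pos kernel_size stride padding dilation out_spatial_shape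
instance (input_pos : List Int) (kernel_size : List Int) (stride : List Int) (padding : List Int) (dilation : List Int) (out_spatial_shape : List Int) (out : List (List Int × Int)) : Decidable (Spec_valid_out_pos_py input_pos kernel_size stride padding dilation out_spatial_shape out) := by unfold Spec_valid_out_pos_py; infer_instance

-- ===== CLAIM (what is proved, stated in full; the proofs are below) =====
def Claim_equal_valid_out_pos_py : Prop := ∀ (input_pos : List Int) (kernel_size : List Int) (stride : List Int) (padding : List Int) (dilation : List Int) (out_spatial_shape : List Int), Dom_valid_out_pos_py input_pos kernel_size stride padding dilation out_spatial_shape → Pre_valid_out_pos_py input_pos kernel_size stride padding dilation out_spatial_shape → Spec_valid_out_pos_py input_pos kernel_size stride padding dilation out_spatial_shape (valid_out_pos_py input_pos kernel_size stride padding dilation out_spatial_shape)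

-- ===== LEMMAS AND PROOFS =====

-- abstract per-dimension data: counter range R, evaluation f c = (coord, term, valid),
-- kernel size k and precomputed multiplier M
structure PvDim where
  R : List Int
  f : Int → Int × Int × Bool
  k : Int
  M : Int

-- right-to-left accumulation of A's inner loop over evaluated entries
def pvInner : List ((Int × Int × Bool) × Int) → List Int × Int × Int × Bool
  | [] => ([], 0, 1, true)
  | (e, k) :: rest =>
      let r := pvInner rest
      (e.1 :: r.1, r.2.1 + r.2.2.1 * e.2.1, r.2.2.1 * k, r.2.2.2 && e.2.2)

def pvEv (ds : List PvDim) (c : List Int) : List ((Int × Int × Bool) × Int) :=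
  (ds.zip c).map (fun p => (p.1.f p.2, p.1.k))

def pvSpecRec : List PvDim → List Int → Int → Bool → List (List Int × Int)
  | [], coords, off, ok => if ok then [(coords, off)] else []
  | d :: ds, coords, off, ok =>
      d.R.flatMap fun c =>
        pvSpecRec ds (coords ++ [(d.f c).1]) (off + (d.f c).2.1 * d.M) (ok && (d.f c).2.2)

def pvProdK : List PvDim → Int
  | [] => 1
  | d :: ds => pvProdK ds * d.k

def pvMokP : List PvDim → Prop
  | [] => True
  | d :: ds => d.M = pvProdK ds ∧ pvMokP ds

def pvProdNat : List Int → Int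
  | [] => 1
  | k :: ks => pvProdNat ks * k

def pvMultsOf : List Int → List Int
  | [] => []
  | _ :: ks => pvProdNat ks :: pvMultsOf ks

def pvToEntry (d : PvDim) : List (Int × Int) × Int :=
  ((d.R.filter (fun c => (d.f c).2.2)).map (fun c => ((d.f c).1, (d.f c).2.1)), d.M)

-- the concrete per-dimension data of the two ports
def pvLF (input_pos kernel_size stride padding dilation : List Int) (j : Int) : Int :=
  PySem.Int.floordiv (pvG input_pos j - (pvG kernel_size j - 1) * pvG dilation j - 1 + pvG stride j + pvG padding j) (pvG stride j)

def pvUF (input_pos stride padding : List Int) (j : Int) : Int :=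
  PySem.Int.floordiv (pvG input_pos j + pvG padding j) (pvG stride j)

def pvSz (input_pos kernel_size stride padding dilation : List Int) (j : Int) : Int :=
  PySem.Int.floordiv (pvUF input_pos stride padding j - pvLF input_pos kernel_size stride padding dilation j) (pvG dilation j) + 1

def pvF (input_pos _kernel_size stride padding dilation out_spatial_shape : List Int) (j : Int) : Int → Int × Int × Bool :=
  fun c =>
    let val := pvUF input_pos stride padding j - c * pvG dilation j
    (val, PySem.Int.floordiv (pvG input_pos j - val * pvG stride j + pvG padding j) (pvG dilation j),
     decide (0 ≤ val ∧ val ≤ pvG out_spatial_shape j - 1))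

def pvDimAt (input_pos kernel_size stride padding dilation out_spatial_shape : List Int) (j : Nat) : PvDim :=
  { R := PySem.List.pyRange 0 (pvSz input_pos kernel_size stride padding dilation (j : Int)) 1
    f := pvF input_pos kernel_size stride padding dilation out_spatial_shape (j : Int)
    k := pvG kernel_size (j : Int)
    M := pvProdNat ((kernel_size.take input_pos.length).drop (j + 1)) }

def pvDims (input_pos kernel_size stride padding dilation out_spatial_shape : List Int) : List PvDim :=
  (List.range input_pos.length).map (pvDimAt input_pos kernel_size stride padding dilation out_spatial_shape)

def pvEntries (input_pos kernel_size stride padding dilation out_spatial_shape : List Int) (j : Int) : List (Int × Int) :=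
  ((PySem.List.pyRange 0 (pvSz input_pos kernel_size stride padding dilation j) 1).filter
      (fun c => (pvF input_pos kernel_size stride padding dilation out_spatial_shape j c).2.2)).map
    (fun c => ((pvF input_pos kernel_size stride padding dilation out_spatial_shape j c).1,
               (pvF input_pos kernel_size stride padding dilation out_spatial_shape j c).2.1))

theorem pvPyRange_range (n : Nat) : PySem.List.pyRange 0 (n : Int) 1 = (List.range n).map (Nat.cast : Nat → Int) := by
  rw [PySem.List.pyRange_one]
  simp only [sub_zero, Int.toNat_natCast, zero_add]

theorem pvInner_append (L : List ((Int × Int × Bool) × Int)) (e : Int × Int × Bool) (kk : Int) :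
    pvInner (L ++ [(e, kk)]) =
      ((pvInner L).1 ++ [e.1], e.2.1 + kk * (pvInner L).2.1, (pvInner L).2.2.1 * kk, (pvInner L).2.2.2 && e.2.2) := by
  induction L with
  | nil => simp [pvInner]
  | cons p L ih =>
    obtain ⟨e', k'⟩ := p
    simp only [List.cons_append, pvInner, ih]
    refine Prod.ext rfl (Prod.ext ?_ (Prod.ext ?_ ?_)) <;> simp <;> [ring; ring; skip]
    cases (pvInner L).2.2.2 <;> cases e'.2.2 <;> cases e.2.2 <;> rfl

theorem pvSpecRec_false (ds : List PvDim) (coords : List Int) (off : Int) :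
    pvSpecRec ds coords off false = [] := by
  induction ds generalizing coords off with
  | nil => rfl
  | cons d ds ih => simp [pvSpecRec, ih]

theorem pvProd_mem_length (Ls : List (List Int)) (c : List Int) (h : c ∈ pvProd Ls) : c.length = Ls.length := by
  induction Ls generalizing c with
  | nil => simp [pvProd] at h; simp [h]
  | cons l Ls ih =>
    simp only [pvProd, List.mem_flatMap, List.mem_map] at h
    obtain ⟨a, _, c', hc', rfl⟩ := h
    simp [ih c' hc']

theorem pvML (ds : List PvDim) (c : List Int) (h : c.length = ds.length) :
    (pvInner (pvEv ds c)).2.2.1 = pvProdK ds := by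
  induction ds generalizing c with
  | nil => rfl
  | cons d ds ih =>
    cases c with
    | nil => simp at h
    | cons x c =>
      simp only [pvEv, List.zip_cons_cons, List.map_cons, pvInner, pvProdK]
      rw [← ih c (by simpa using h)]
      rfl

theorem pvFilterMapFlatMap {α β γ : Type} (l : List α) (h : α → List β) (P : β → Bool) (G : β → γ) :
    ((l.flatMap h).filter P).map G = l.flatMap (fun a => ((h a).filter P).map G) := by
  induction l with
  | nil => rfl
  | cons a l ih => simp [List.flatMap_cons, List.filter_append, ih]

theorem pvM1 (ds : List PvDim) (hmok : pvMokP ds) (coords0 : List Int) (off0 : Int) :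
    ((pvProd (ds.map PvDim.R)).filter (fun c => (pvInner (pvEv ds c)).2.2.2)).map
        (fun c => (coords0 ++ (pvInner (pvEv ds c)).1, off0 + (pvInner (pvEv ds c)).2.1))
      = pvSpecRec ds coords0 off0 true := by
  induction ds generalizing coords0 off0 with
  | nil => simp [pvProd, pvEv, pvInner, pvSpecRec]
  | cons d ds ih =>
    obtain ⟨hM, hmok'⟩ := hmok
    simp only [pvProd, List.map_cons, pvSpecRec]
    rw [pvFilterMapFlatMap]
    congr 1
    funext a
    rw [List.filter_map, List.map_map]
    by_cases hfa : (d.f a).2.2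
    · have h1 : ((fun c => (pvInner (pvEv (d :: ds) c)).2.2.2) ∘ (List.cons a))
          = fun c => (pvInner (pvEv ds c)).2.2.2 := by
        funext c; simp [pvEv, pvInner, hfa]
      rw [h1]
      have h2 : ∀ c ∈ (pvProd (ds.map PvDim.R)).filter (fun c => (pvInner (pvEv ds c)).2.2.2),
          ((fun c => (coords0 ++ (pvInner (pvEv (d :: ds) c)).1, off0 + (pvInner (pvEv (d :: ds) c)).2.1)) ∘ (List.cons a)) c
            = (fun c => ((coords0 ++ [(d.f a).1]) ++ (pvInner (pvEv ds c)).1, (off0 + (d.f a).2.1 * d.M) + (pvInner (pvEv ds c)).2.1)) c := by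
        intro c hc
        have hlen : c.length = ds.length := by
          have := pvProd_mem_length _ c (List.mem_of_mem_filter hc); simpa using this
        have hm := pvML ds c hlen
        refine Prod.ext ?_ ?_
        · simp [pvEv, pvInner]
        · simp only [pvEv] at hm
          simp only [Function.comp_apply, pvEv, List.zip_cons_cons, List.map_cons, pvInner, hm, hM]
          ring
      rw [List.map_congr_left h2, ih hmok', hfa, Bool.and_true]
    · have h1 : ((fun c => (pvInner (pvEv (d :: ds) c)).2.2.2) ∘ (List.cons a))
          = fun _ => false := by
        funext c; simp [pvEv, pvInner, hfa]
      rw [h1]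
      simp [pvSpecRec_false, hfa]

theorem pvFlatMapFilter {α β : Type} (l : List α) (p : α → Bool) (g : α → List β) :
    (l.filter p).flatMap g = l.flatMap (fun c => if p c then g c else []) := by
  induction l with
  | nil => rfl
  | cons a l ih =>
    by_cases h : p a <;> simp [h, ih]

theorem pvM2 (ds : List PvDim) :
    ∀ (acc : List (List Int × Int)),
    (ds.map pvToEntry).foldl
        (fun (results : List (List Int × Int)) em =>
          results.flatMap (fun co => em.1.map (fun vt => (co.1 ++ [vt.1], co.2 + vt.2 * em.2)))) acc
      = acc.flatMap (fun co => pvSpecRec ds co.1 co.2 true) := by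
  induction ds with
  | nil =>
    intro acc
    simp [pvSpecRec]
  | cons d ds ih =>
    intro acc
    rw [List.map_cons, List.foldl_cons, ih, List.flatMap_assoc]
    congr 1
    funext co
    simp only [pvToEntry, List.flatMap_map, pvFlatMapFilter, pvSpecRec]
    congr 1
    funext c
    by_cases h : (d.f c).2.2 <;> simp [h, pvSpecRec_false]

theorem pvDropSet (l : List Int) (m : Nat) (x : Int) (h : m < l.length) :
    (l.set m x).drop m = x :: l.drop (m + 1) := by
  induction l generalizing m with
  | nil => simp at h
  | cons a l ih =>
    cases m with
    | zero => simp
    | succ m => simp only [List.set_cons_succ, List.drop_succ_cons]; exact ih m (by simpa using h)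

theorem pvINN (e : Int → Int × Int × Bool) (k : Int → Int) (m : Nat) :
    ∀ (coords0 : List Int) (off0 mult0 : Int) (ok0 : Bool), m ≤ coords0.length →
    ((PySem.List.pyRange 0 (m : Int) 1).reverse).foldl
        (fun (s : List Int × Int × Int × Bool) j =>
          (PySem.List.pySetD s.1 j (e j).1,
           s.2.1 + s.2.2.1 * (e j).2.1,
           s.2.2.1 * k j,
           s.2.2.2 && (e j).2.2))
        (coords0, off0, mult0, ok0)
      = ((pvInner ((List.range m).map (fun (j : Nat) => (e (j : Int), k (j : Int))))).1 ++ coords0.drop m,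
         off0 + mult0 * (pvInner ((List.range m).map (fun (j : Nat) => (e (j : Int), k (j : Int))))).2.1,
         mult0 * (pvInner ((List.range m).map (fun (j : Nat) => (e (j : Int), k (j : Int))))).2.2.1,
         ok0 && (pvInner ((List.range m).map (fun (j : Nat) => (e (j : Int), k (j : Int))))).2.2.2) := by
  induction m with
  | zero =>
    intro coords0 off0 mult0 ok0 _h
    rw [Nat.cast_zero, PySem.List.pyRange_one_eq_nil (le_refl 0)]
    simp [pvInner]
  | succ m ih =>
    intro coords0 off0 mult0 ok0 h
    have hcast : ((m + 1 : Nat) : Int) = (m : Int) + 1 := by push_cast; ring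
    rw [hcast, PySem.List.pyRange_one_succ_right (by positivity), List.reverse_append,
      List.reverse_singleton, List.singleton_append, List.foldl_cons]
    simp only [PySem.List.pySetD_natCast]
    rw [ih (coords0.set m (e (m : Int)).1) (off0 + mult0 * (e (m : Int)).2.1)
        (mult0 * k (m : Int)) (ok0 && (e (m : Int)).2.2) (by simpa using Nat.le_of_succ_le h)]
    rw [List.range_succ, List.map_append, List.map_cons, List.map_nil, pvInner_append]
    refine Prod.ext ?_ (Prod.ext ?_ (Prod.ext ?_ ?_))
    · simp only []
      rw [pvDropSet coords0 m _ (by omega)]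
      simp [List.append_assoc]
    · simp only []; ring
    · simp only []; ring
    · simp only []
      cases ok0 <;> cases hb : (e (m : Int)).2.2 <;> simp

theorem pvG_map_pyRange (f : Int → Int) (n i : Int) (h0 : 0 ≤ i) (h : i < n) :
    pvG ((PySem.List.pyRange 0 n 1).map f) i = f i :=
  PySem.List.pyGetD_map_pyRange_of_nonneg f n i 0 h0 h

theorem pvIfValid (a u : Int) (b : Bool) :
    (if a < 0 ∨ u < a then false else b) = (b && decide (0 ≤ a ∧ a ≤ u)) := by
  split_ifs with h
  · have : ¬ (0 ≤ a ∧ a ≤ u) := by omega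
    simp [this]
  · have : 0 ≤ a ∧ a ≤ u := by omega
    simp [this]

theorem pvCountdown (n : Nat) :
    PySem.List.pyRange ((n : Int) - 1) (-1) (-1) = (PySem.List.pyRange 0 (n : Int) 1).reverse := by
  rw [PySem.List.pyRange_neg_one_eq_reverse]
  norm_num

theorem pvFoldPair (l : List Int) (f h : Int → Int) :
    ∀ (a1 a2 : List Int),
      l.foldl (fun (p : List Int × List Int) i => (p.1 ++ [f i], p.2 ++ [h i])) (a1, a2)
        = (a1 ++ l.map f, a2 ++ l.map h) := by
  induction l with
  | nil => intro a1 a2; simp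
  | cons x l ih => intro a1 a2; simp [List.foldl_cons, ih]

theorem pvRevFold (l : List Int) :
    (l.reverse.foldl (fun (p : List Int × Int) k => (p.1 ++ [p.2], p.2 * k)) ([], 1))
      = ((pvMultsOf l).reverse, pvProdNat l) := by
  induction l with
  | nil => rfl
  | cons k l ih =>
    rw [List.reverse_cons, List.foldl_append, ih]
    simp [pvMultsOf, pvProdNat]

theorem pvMultsOf_eq (l : List Int) :
    pvMultsOf l = (List.range l.length).map (fun j => pvProdNat (l.drop (j + 1))) := by
  induction l with
  | nil => rfl
  | cons k l ih =>
    rw [pvMultsOf, ih, List.length_cons, List.range_succ_eq_map]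
    simp [List.map_map, Function.comp]

theorem pvProdK_map (F : Nat → PvDim) (L : List Nat) :
    pvProdK (L.map F) = pvProdNat (L.map (fun j => (F j).k)) := by
  induction L with
  | nil => rfl
  | cons j L ih => simp [pvProdK, pvProdNat, ih]

theorem pvKlist (ks : List Int) (n s c : Nat) (hks : n ≤ ks.length) (hsc : s + c = n) :
    (ks.take n).drop s = (List.range' s c).map (fun (j : Nat) => pvG ks (j : Int)) := by
  apply List.ext_getElem
  · simp [List.length_take_of_le hks, List.length_range']
    omega
  · intro i h1 h2
    have hlt : s + i < n := by simp [List.length_take_of_le hks] at h1; omega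
    simp only [List.getElem_drop, List.getElem_take, List.getElem_map, List.getElem_range'_1]
    unfold pvG
    rw [PySem.List.pyGetD_natCast, List.getD_eq_getElem ks 0 (by omega)]

theorem pvMok (input_pos kernel_size stride padding dilation out_spatial_shape : List Int)
    (hks : input_pos.length ≤ kernel_size.length) :
    pvMokP (pvDims input_pos kernel_size stride padding dilation out_spatial_shape) := by
  have key : ∀ (c s : Nat), s + c = input_pos.length →
      pvMokP ((List.range' s c).map (pvDimAt input_pos kernel_size stride padding dilation out_spatial_shape)) := by
    intro c
    induction c with
    | zero => intro s _; simp [pvMokP]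
    | succ c ih =>
      intro s hs
      rw [List.range'_succ, List.map_cons]
      refine ⟨?_, ih (s + 1) (by omega)⟩
      rw [pvProdK_map]
      simp only [pvDimAt]
      rw [← pvKlist kernel_size input_pos.length (s + 1) c hks (by omega)]
  rw [pvDims, List.range_eq_range']
  exact key input_pos.length 0 (by omega)

theorem pvEvEq (input_pos kernel_size stride padding dilation out_spatial_shape : List Int)
    (c : List Int) (hlen : c.length = input_pos.length) :
    pvEv (pvDims input_pos kernel_size stride padding dilation out_spatial_shape) c
      = (List.range input_pos.length).map
          (fun (j : Nat) => (pvF input_pos kernel_size stride padding dilation out_spatial_shape (j : Int) (pvG c (j : Int)),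
                             pvG kernel_size (j : Int))) := by
  apply List.ext_getElem
  · simp [pvEv, pvDims, hlen]
  · intro i h1 h2
    have hin : i < input_pos.length := by simpa using h2
    simp only [pvEv, pvDims, List.getElem_map, List.getElem_zip, List.getElem_range]
    unfold pvG
    rw [PySem.List.pyGetD_natCast c i 0, List.getD_eq_getElem c 0 (by omega)]
    rfl

theorem pvEntriesFold (ip ks st pad dil oss : List Int) (j : Int) :
    (PySem.List.pyRange 0 (PySem.Int.floordiv (PySem.Int.floordiv (pvG ip j + pvG pad j) (pvG st j) - PySem.Int.floordiv (pvG ip j - (pvG ks j - 1) * pvG dil j - 1 + pvG st j + pvG pad j) (pvG st j)) (pvG dil j) + 1) 1).foldl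
      (fun (es : List (Int × Int)) c =>
        let val := PySem.Int.floordiv (pvG ip j + pvG pad j) (pvG st j) - c * pvG dil j
        if 0 ≤ val ∧ val ≤ pvG oss j - 1 then
          es ++ [(val, PySem.Int.floordiv (pvG ip j - val * pvG st j + pvG pad j) (pvG dil j))]
        else es) []
    = pvEntries ip ks st pad dil oss j := by
  rw [PySem.List.foldl_congr_mem _ _ (fun (es : List (Int × Int)) c =>
        if (pvF ip ks st pad dil oss j c).2.2 = true then
          es ++ [((pvF ip ks st pad dil oss j c).1, (pvF ip ks st pad dil oss j c).2.1)] else es) _ ?_]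
  · rw [PySem.List.foldl_append_if, List.nil_append]
    rfl
  · intro es c _
    simp only [pvF, pvUF, decide_eq_true_eq]

theorem pvBeq (ip ks st pad dil oss : List Int) (hks : ip.length ≤ ks.length) :
    valid_out_pos_py_alt ip ks st pad dil oss = pvSpecRec (pvDims ip ks st pad dil oss) [] 0 true := by
  unfold valid_out_pos_py_alt
  simp only []
  rw [PySem.List.foldl_congr_mem (PySem.List.pyRange 0 (ip.length : Int) 1) _
      (fun (pdl : List (List (Int × Int))) j => pdl ++ [pvEntries ip ks st pad dil oss j]) []
      (fun pdl j _ => congrArg (fun e => pdl ++ [e]) (pvEntriesFold ip ks st pad dil oss j))]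
  rw [PySem.List.foldl_append_singleton_eq_map, List.nil_append, pvPyRange_range, List.map_map]
  rw [PySem.List.slice_to_natCast, pvRevFold]
  simp only [List.reverse_reverse]
  rw [pvMultsOf_eq, List.length_take_of_le hks, List.zip_map']
  refine Eq.trans ?_ (Eq.trans (pvM2 (pvDims ip ks st pad dil oss) [([], 0)]) (by simp))
  congr 1
  rw [pvDims, List.map_map]
  exact List.map_congr_left (fun (j : Nat) _ => rfl)

def pvStep (ip ks st pad dil oss : List Int) (c : List Int) :
    (List Int × Int × Int × Bool) → Int → (List Int × Int × Int × Bool) := fun s j =>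
  (PySem.List.pySetD s.1 j (pvF ip ks st pad dil oss j (pvG c j)).1,
   s.2.1 + s.2.2.1 * (pvF ip ks st pad dil oss j (pvG c j)).2.1,
   s.2.2.1 * pvG ks j,
   s.2.2.2 && (pvF ip ks st pad dil oss j (pvG c j)).2.2)

theorem pvINN' (ip ks st pad dil oss : List Int) (c : List Int) (m : Nat)
    (coords0 : List Int) (off0 mult0 : Int) (ok0 : Bool) (h : m ≤ coords0.length) :
    ((PySem.List.pyRange 0 (m : Int) 1).reverse).foldl (pvStep ip ks st pad dil oss c) (coords0, off0, mult0, ok0)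
      = ((pvInner ((List.range m).map (fun (j : Nat) => (pvF ip ks st pad dil oss (j : Int) (pvG c (j : Int)), pvG ks (j : Int))))).1 ++ coords0.drop m,
         off0 + mult0 * (pvInner ((List.range m).map (fun (j : Nat) => (pvF ip ks st pad dil oss (j : Int) (pvG c (j : Int)), pvG ks (j : Int))))).2.1,
         mult0 * (pvInner ((List.range m).map (fun (j : Nat) => (pvF ip ks st pad dil oss (j : Int) (pvG c (j : Int)), pvG ks (j : Int))))).2.2.1,
         ok0 && (pvInner ((List.range m).map (fun (j : Nat) => (pvF ip ks st pad dil oss (j : Int) (pvG c (j : Int)), pvG ks (j : Int))))).2.2.2) :=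
  pvINN (fun i => pvF ip ks st pad dil oss i (pvG c i)) (fun i => pvG ks i) m coords0 off0 mult0 ok0 h

theorem pvAeq (ip ks st pad dil oss : List Int) :
    valid_out_pos_py ip ks st pad dil oss
      = ((pvProd ((pvDims ip ks st pad dil oss).map PvDim.R)).filter
            (fun c => (pvInner (pvEv (pvDims ip ks st pad dil oss) c)).2.2.2)).map
          (fun c => ((pvInner (pvEv (pvDims ip ks st pad dil oss) c)).1,
                     (pvInner (pvEv (pvDims ip ks st pad dil oss) c)).2.1)) := by
  unfold valid_out_pos_py
  simp only [pvFoldPair, List.nil_append]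
  rw [PySem.List.foldl_append_singleton_eq_map, List.nil_append]
  refine Eq.trans (PySem.List.foldl_congr_mem _ _
      (fun acc (c : List Int) =>
        if (pvInner (pvEv (pvDims ip ks st pad dil oss) c)).2.2.2 = true then
          acc ++ [((pvInner (pvEv (pvDims ip ks st pad dil oss) c)).1,
                   (pvInner (pvEv (pvDims ip ks st pad dil oss) c)).2.1)]
        else acc) _ ?_) ?_
  · -- the per-counter body of A computes pvInner over the evaluated dimensions
    intro acc c hc
    have hlen : c.length = ip.length := by
      have := pvProd_mem_length _ c hc
      simpa using this
    rw [pvCountdown ip.length]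
    rw [PySem.List.foldl_congr_mem _ _ (pvStep ip ks st pad dil oss c) _ ?hstep]
    case hstep =>
      intro s j hj
      obtain ⟨hj0, hj1⟩ := PySem.List.mem_pyRange_one.mp (List.mem_reverse.mp hj)
      simp only [pvG_map_pyRange _ _ _ hj0 hj1, pvStep, pvF, pvUF, pvIfValid]
      rfl
    rw [pvINN' ip ks st pad dil oss c ip.length _ _ _ _ (by simp)]
    simp only [List.drop_replicate, Nat.sub_self, List.replicate_zero, List.append_nil,
      zero_add, one_mul, Bool.true_and]
    rw [← pvEvEq ip ks st pad dil oss c hlen]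
  · rw [PySem.List.foldl_append_if, List.nil_append]
    have hRs : ((PySem.List.pyRange 0 (ip.length : Int) 1).map
          (fun i => PySem.Int.floordiv
              (pvG ((PySem.List.pyRange 0 (ip.length : Int) 1).map
                  (fun i => PySem.Int.floordiv (pvG ip i + pvG pad i) (pvG st i))) i
                - pvG ((PySem.List.pyRange 0 (ip.length : Int) 1).map
                  (fun i => PySem.Int.floordiv (pvG ip i - (pvG ks i - 1) * pvG dil i - 1 + pvG st i + pvG pad i) (pvG st i))) i)
              (pvG dil i) + 1)).map (fun size => PySem.List.pyRange 0 size 1)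
        = (pvDims ip ks st pad dil oss).map PvDim.R := by
      rw [List.map_map]
      refine Eq.trans (List.map_congr_left
          (g := fun i => PySem.List.pyRange 0 (pvSz ip ks st pad dil i) 1) ?_) ?_
      · intro i hi
        obtain ⟨h0, h1⟩ := PySem.List.mem_pyRange_one.mp hi
        simp only [Function.comp_apply, pvG_map_pyRange _ _ _ h0 h1]
        rfl
      · rw [pvPyRange_range, List.map_map, pvDims, List.map_map]
        exact List.map_congr_left (fun j _ => rfl)
    rw [hRs]

theorem pvMainEq (input_pos kernel_size stride padding dilation out_spatial_shape : List Int)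
    (hks : input_pos.length ≤ kernel_size.length) :
    valid_out_pos_py input_pos kernel_size stride padding dilation out_spatial_shape
      = valid_out_pos_py_alt input_pos kernel_size stride padding dilation out_spatial_shape := by
  rw [pvAeq, pvBeq input_pos kernel_size stride padding dilation out_spatial_shape hks,
    ← pvM1 _ (pvMok input_pos kernel_size stride padding dilation out_spatial_shape hks) [] 0]
  exact List.map_congr_left (fun c hc => by simp)

-- ===== VERDICT (by name: the statement is the Claim_ definition above) =====
theorem valid_out_pos_py_spec : Claim_equal_valid_out_pos_py := by
  intro ip ks st pd dl oss _hdom hpre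
  unfold Spec_valid_out_pos_py
  exact pvMainEq ip ks st pd dl oss hpre.1
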